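-- pv_equiv track=rewrite | github.com/juanse17lz/ProyectosFacultad | Progra1_2025/Programacion2025/Clases/Clase_10_Cadena_caracteres.py | termino_mail
-- ===== SOURCE A (Python) =====
-- def termino_mail(mail:str)->str:
--     """Guarda la terminacion de un mail y lo devuelve. Guarda todo lo que encuentre despues del primer arroba encontrado.
--
--     Args:
--         mail (str): Cadena a verificar.
--
--     Returns:
--         str: _description_
--     """
--     termino = None
--     contador = 0
--     for i in range(len(mail)):
--         if ord(mail[i]) == 64:
--             termino = mail[i:len(mail)]
--             contador += 1
--     if termino == None or contador > 1:
--         termino = "No es un mail."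
--     return termino
-- ===== SOURCE B (Python) =====
-- def termino_mail(mail: str) -> str:
--     i = mail.find('@')
--     if i != -1 and mail.find('@', i + 1) == -1:
--         return mail[i:]
--     return "No es un mail."
-- ===== Notes on version B (the rewrite author's own statement) =====
-- stated objective: faster
-- what changed: Replaces the full per-character scan with counter and repeated slicing by two str.find calls (first '@', then a second '@' after it) and a single slice.
import Mathlib
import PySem

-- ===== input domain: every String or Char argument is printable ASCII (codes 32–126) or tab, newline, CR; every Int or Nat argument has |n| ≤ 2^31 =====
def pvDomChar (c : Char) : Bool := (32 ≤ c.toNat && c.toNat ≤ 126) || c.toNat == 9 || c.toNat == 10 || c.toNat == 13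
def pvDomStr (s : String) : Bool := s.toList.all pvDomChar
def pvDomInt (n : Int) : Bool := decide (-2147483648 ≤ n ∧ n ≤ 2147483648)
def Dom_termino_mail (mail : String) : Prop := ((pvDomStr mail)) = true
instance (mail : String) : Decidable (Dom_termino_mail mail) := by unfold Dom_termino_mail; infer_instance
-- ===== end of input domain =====

-- B replaces A's per-character scan (counter + slice at every '@') by two str.find calls and one slice.

-- ===== PORT A =====
def termino_mail (mail : String) : String :=
  let cs := mail.toList
  let st : Option (List Char) × Int :=
    (PySem.List.pyRange 0 cs.length 1).foldl
      (fun st i =>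
        if (PySem.List.pyGetD cs i default).toNat = 64 then
          (some (PySem.List.slice cs (some i) (some (cs.length : Int))), st.2 + 1)
        else st)
      (none, 0)
  match st with
  | (none, _) => "No es un mail."
  | (some t, c) => if c > 1 then "No es un mail." else String.ofList t

-- ===== PORT B =====
def termino_mail_alt (mail : String) : String :=
  let i := PySem.Str.find mail "@"
  if i ≠ -1 ∧ PySem.Str.findFrom mail "@" (i + 1) none = -1 then
    String.ofList (PySem.List.slice mail.toList (some i) none)
  else "No es un mail."

-- ===== PRECONDITION & SPEC =====
def Spec_termino_mail (mail : String) (out : String) : Prop := out = termino_mail_alt mail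
instance (mail : String) (out : String) : Decidable (Spec_termino_mail mail out) := by unfold Spec_termino_mail; infer_instance

-- ===== CLAIM (what is proved, stated in full; the proofs are below) =====
def Claim_equal_termino_mail : Prop := ∀ (mail : String), Dom_termino_mail mail → Spec_termino_mail mail (termino_mail mail)

-- ===== LEMMAS AND PROOFS =====

-- Structural model of A's loop: walks the suffix, at every '@' stores that suffix and bumps the counter.
def loopA : List Char → (Option (List Char) × Int) → Option (List Char) × Int
  | [], st => st
  | c :: rest, st =>
      loopA rest (if c.toNat = 64 then (some (c :: rest), st.2 + 1) else st)

theorem char_toNat64 (c : Char) : (c.toNat = 64) = (c = '@') := by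
  apply propext
  constructor
  · intro h
    have h2 := Char.ofNat_toNat c
    rw [h] at h2
    exact h2.symm
  · intro h; subst h; rfl

theorem fold_eq_loopA (cs : List Char) :
    ∀ (suf pre : List Char) (st : Option (List Char) × Int), cs = pre ++ suf →
    (PySem.List.pyRange (pre.length) (cs.length) 1).foldl
      (fun st i =>
        if (PySem.List.pyGetD cs i default).toNat = 64 then
          (some (PySem.List.slice cs (some i) (some (cs.length : Int))), st.2 + 1)
        else st) st
    = loopA suf st := by
  intro suf
  induction suf with
  | nil =>
    intro pre st h
    subst h
    rw [List.append_nil]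
    rw [PySem.List.pyRange_one_eq_nil (by omega)]
    rfl
  | cons c rest ih =>
    intro pre st h
    subst h
    have hlt : (pre.length : Int) < ((pre ++ c :: rest).length : Int) := by
      simp
    rw [PySem.List.pyRange_one_cons hlt]
    rw [List.foldl_cons]
    have hget : PySem.List.pyGetD (pre ++ c :: rest) (pre.length : Int) default = c := by
      rw [PySem.List.pyGetD_natCast]
      simp [List.getD_eq_getElem?_getD]
    have hslice : PySem.List.slice (pre ++ c :: rest) (some (pre.length : Int))
        (some (((pre ++ c :: rest).length : Nat) : Int)) = c :: rest := by
      rw [PySem.List.slice_natCast]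
      simp
    rw [hget, hslice]
    have hcast : (pre.length : Int) + 1 = ((pre ++ [c]).length : Nat) := by
      simp
    rw [hcast]
    rw [show loopA (c :: rest) st = loopA rest (if c.toNat = 64 then (some (c :: rest), st.2 + 1) else st) from rfl]
    exact ih (pre ++ [c]) _ (by simp)

theorem loopA_no_at (suf : List Char) (st : Option (List Char) × Int)
    (h : '@' ∉ suf) : loopA suf st = st := by
  induction suf generalizing st with
  | nil => rfl
  | cons c rest ih =>
    simp only [List.mem_cons, not_or] at h
    simp only [loopA, char_toNat64]
    rw [if_neg (fun hc => h.1 hc.symm)]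
    exact ih _ (h.2)

theorem loopA_split (p q : List Char) (st : Option (List Char) × Int) (hq : '@' ∉ q) :
    loopA (p ++ '@' :: q) st = (some ('@' :: q), st.2 + (p.count '@' : Int) + 1) := by
  induction p generalizing st with
  | nil =>
    simp only [List.nil_append, loopA, char_toNat64]
    rw [loopA_no_at q _ hq]
    simp
  | cons c p' ih =>
    simp only [List.cons_append, loopA, char_toNat64]
    by_cases hc : c = '@'
    · rw [if_pos hc, ih]
      subst hc
      simp
      ring
    · rw [if_neg hc, ih]
      rw [List.count_cons]
      simp [hc]

-- last-occurrence decomposition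
theorem exists_last_split (cs : List Char) (h : '@' ∈ cs) :
    ∃ p q, cs = p ++ '@' :: q ∧ '@' ∉ q := by
  induction cs using List.reverseRecOn with
  | nil => simp at h
  | append_singleton ds c ih =>
    by_cases hc : c = '@'
    · exact ⟨ds, [], by simp [hc], by simp⟩
    · have hm : '@' ∈ ds := by
        rcases List.mem_append.1 h with h1 | h1
        · exact h1
        · simp at h1; exact absurd h1.symm hc
      obtain ⟨p, q, hpq, hqn⟩ := ih hm
      refine ⟨p, q ++ [c], by simp [hpq], ?_⟩
      intro hmem
      rcases List.mem_append.1 hmem with h1 | h1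
      · exact hqn h1
      · simp at h1; exact hc h1.symm

-- first-occurrence decomposition
theorem exists_first_split (cs : List Char) (h : '@' ∈ cs) :
    ∃ p q, cs = p ++ '@' :: q ∧ '@' ∉ p := by
  induction cs with
  | nil => simp at h
  | cons c rest ih =>
    by_cases hc : c = '@'
    · exact ⟨[], rest, by simp [hc], by simp⟩
    · have hm : '@' ∈ rest := by
        rcases List.mem_cons.1 h with h1 | h1
        · exact absurd h1.symm hc
        · exact h1
      obtain ⟨p, q, hpq, hp⟩ := ih hm
      refine ⟨c :: p, q, by simp [hpq], ?_⟩
      intro hmem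
      rcases List.mem_cons.1 hmem with h1 | h1
      · exact hc h1.symm
      · exact hp h1

theorem singleton_prefix_iff (a : Char) (l : List Char) : [a] <+: l ↔ l.head? = some a := by
  cases l with
  | nil => simp
  | cons b t => simp [List.cons_prefix_cons, eq_comm]

theorem singleton_prefix_drop (a : Char) (l : List Char) (j : Nat) :
    [a] <+: l.drop j ↔ l[j]? = some a := by
  rw [singleton_prefix_iff, List.head?_drop]

theorem singleton_infix_iff (a : Char) (l : List Char) : [a] <:+: l ↔ a ∈ l := by
  constructor
  · intro ⟨s, t, h⟩; subst h; simp
  · intro h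
    obtain ⟨s, t, h⟩ := List.append_of_mem h
    exact ⟨s, t, by simp [h]⟩

theorem find_first (u w : List Char) (hu : '@' ∉ u) :
    PySem.Chars.find (u ++ '@' :: w) ['@'] = (u.length : Int) := by
  have hinf : ['@'] <:+: (u ++ '@' :: w) := (singleton_infix_iff _ _).2 (by simp)
  have hne : PySem.Chars.find (u ++ '@' :: w) ['@'] ≠ -1 :=
    (PySem.Chars.find_ne_neg_one_iff _ _).2 hinf
  have hspec := PySem.Chars.findFrom_natCast_spec (u ++ '@' :: w) ['@'] 0 (by simp)
  simp only [Nat.cast_zero, PySem.Chars.findFrom_zero] at hspec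
  obtain ⟨-, hpre, hmin⟩ := hspec hne
  have hnn : 0 ≤ PySem.Chars.find (u ++ '@' :: w) ['@'] :=
    (PySem.Chars.find_nonneg_iff _ _).2 hinf
  set f := PySem.Chars.find (u ++ '@' :: w) ['@'] with hf
  have hat : (u ++ '@' :: w)[f.toNat]? = some '@' := (singleton_prefix_drop _ _ _).1 hpre
  -- f.toNat = u.length
  have : f.toNat = u.length := by
    rcases lt_trichotomy f.toNat u.length with hlt | heq | hgt
    · exfalso
      rw [List.getElem?_append_left hlt] at hat
      exact hu (List.mem_of_getElem? hat)
    · exact heq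
    · exfalso
      apply hmin u.length (by omega) hgt
      rw [singleton_prefix_drop]
      rw [List.getElem?_append_right (le_refl _)]
      simp
  omega

-- characterization of A's fold result
theorem foldA_eq (cs : List Char) :
    (PySem.List.pyRange 0 cs.length 1).foldl
      (fun st i =>
        if (PySem.List.pyGetD cs i default).toNat = 64 then
          (some (PySem.List.slice cs (some i) (some (cs.length : Int))), st.2 + 1)
        else st) ((none : Option (List Char)), (0 : Int))
    = loopA cs (none, 0) := by
  have := fold_eq_loopA cs cs [] (none, 0) rfl
  simpa using this

-- ===== VERDICT (by name: the statement is the Claim_ definition above) =====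
theorem termino_mail_spec : Claim_equal_termino_mail := by
  intro mail _
  unfold Spec_termino_mail termino_mail termino_mail_alt
  simp only [PySem.Str.find_eq, PySem.Str.findFrom_eq, show "@".toList = ['@'] from rfl]
  set cs := mail.toList with hcs
  rw [foldA_eq]
  by_cases hmem : '@' ∈ cs
  · obtain ⟨p, q, hpq, hq⟩ := exists_last_split cs hmem
    rw [hpq, loopA_split p q _ hq]
    dsimp only
    by_cases hp : '@' ∈ p
    · -- at least two '@': A errors; B finds a second '@'
      obtain ⟨u, v, hpuv, hu⟩ := exists_first_split p hp
      have hcs2 : p ++ '@' :: q = u ++ '@' :: (v ++ '@' :: q) := by simp [hpuv]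
      rw [hcs2]
      rw [find_first u _ hu]
      have hcnt : (0:Int) + (p.count '@' : Int) + 1 > 1 := by
        have : 0 < p.count '@' := List.count_pos_iff.2 hp
        omega
      rw [if_pos hcnt]
      have hff : PySem.Chars.findFrom (u ++ '@' :: (v ++ '@' :: q)) ['@'] ((u.length : Int) + 1) none ≠ -1 := by
        have hk : (u.length + 1 : Nat) ≤ (u ++ '@' :: (v ++ '@' :: q)).length := by simp
        have := PySem.Chars.findFrom_natCast_eq_neg_one_iff (u ++ '@' :: (v ++ '@' :: q)) ['@'] (u.length + 1) hk
        push_cast at this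
        intro heq
        rw [this] at heq
        apply heq
        rw [show (u ++ '@' :: (v ++ '@' :: q)).drop (u.length + 1) = v ++ '@' :: q by
          rw [show u ++ '@' :: (v ++ '@' :: q) = (u ++ ['@']) ++ (v ++ '@' :: q) by simp]
          rw [show u.length + 1 = (u ++ ['@']).length by simp]
          exact List.drop_left]
        exact (singleton_infix_iff _ _).2 (by simp)
      rw [if_neg (by intro hand; exact hff hand.2)]
    · -- exactly one '@'
      have hfind : PySem.Chars.find (p ++ '@' :: q) ['@'] = (p.length : Int) := find_first p q hp
      rw [hfind]
      have hcnt : ¬ ((0:Int) + (p.count '@' : Int) + 1 > 1) := by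
        have : p.count '@' = 0 := List.count_eq_zero.2 hp
        rw [this]; norm_num
      rw [if_neg hcnt]
      have hff : PySem.Chars.findFrom (p ++ '@' :: q) ['@'] ((p.length : Int) + 1) none = -1 := by
        have hk : (p.length + 1 : Nat) ≤ (p ++ '@' :: q).length := by simp
        have := PySem.Chars.findFrom_natCast_eq_neg_one_iff (p ++ '@' :: q) ['@'] (p.length + 1) hk
        push_cast at this
        rw [this]
        rw [show (p ++ '@' :: q).drop (p.length + 1) = q by
          rw [show p ++ '@' :: q = (p ++ ['@']) ++ q by simp]
          rw [show p.length + 1 = (p ++ ['@']).length by simp]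
          exact List.drop_left]
        rw [singleton_infix_iff]
        exact hq
      rw [if_pos ⟨by omega, hff⟩]
      congr 1
      rw [PySem.List.slice_from_natCast]
      exact List.drop_left.symm
  · -- no '@' at all: both error
    rw [loopA_no_at cs _ hmem]
    have hfind : PySem.Chars.find cs ['@'] = -1 :=
      (PySem.Chars.find_eq_neg_one_iff _ _).2 (fun h => hmem ((singleton_infix_iff _ _).1 h))
    rw [hfind]
    simp
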